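-- pv_equiv track=rewrite | github.com/BlaStar1249/cryptii | cryptii.py | ADFGX_cipher
-- ===== SOURCE A (Python) =====
-- def ADFGX_cipher(txt, alp="abcdefghiklmnopqrstuvwxyz", key="key"):
--     """"Alphabet must contain 25 english letters once except 'j'"""
--     row = column = "ADFGX"
--     key_dict = dict()
--     if len(alp) != 25:
--         raise ValueError("alphabet must contain 25 english letters once except 'j'")
--     txt = txt.lower()
--     encrypted = ""
--     encrypted2 = ""
--     encrypted3 = ""
--     idx = -1
--     for s in txt:
--         idx += 1
--         if s=="j":
--             s="i"
--         if s in alp: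
--             alphabet_idx = alp.find(s)
--             row_idx, column_idx = divmod(alphabet_idx, 5)
--             encrypted2 += row[row_idx] + column[column_idx]
--     key_dict = {s: "" for s in key}
--     idx = -1
--     key_length = len(key)
--     for s in encrypted2:
--         idx += 1
--         key_dict[key[idx%key_length]] += s
--     # sort a dictionary by keys
--     key_dict = dict(sorted(key_dict.items()))
--     for d in key_dict:
--         encrypted3 += key_dict[d]
--     # insert " " after every 5 characters
--     idx = 0
--     length = len(encrypted3)
--     for s in encrypted3:
--         idx += 1
--         encrypted += s
--         encrypted += " " if idx%5==0 and idx!=length else ""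
--     return encrypted
-- ===== SOURCE B (Python) =====
-- def ADFGX_cipher(txt, alp="abcdefghiklmnopqrstuvwxyz", key="key"):
--     """ADFGX encryption; alphabet must contain 25 letters (no 'j')."""
--     if len(alp) != 25:
--         raise ValueError("alphabet must contain 25 english letters once except 'j'")
--     rc = "ADFGX"
--     enc2 = []
--     for s in txt.lower():
--         if s == "j":
--             s = "i"
--         i = alp.find(s)
--         if i >= 0:
--             enc2.append(rc[i // 5])
--             enc2.append(rc[i % 5])
--     L = len(key)
--     enc3 = "".join(ch for letter in sorted(set(key))
--                       for i, ch in enumerate(enc2) if key[i % L] == letter)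
--     return " ".join(enc3[i:i + 5] for i in range(0, len(enc3), 5))
-- ===== Notes on version B (the rewrite author's own statement) =====
-- stated objective: idiomatic
-- what changed: The dict-of-buckets transposition is replaced by iterating the stably sorted distinct key letters and filtering each letter's columns out of the fractionated text, and the manual space-insertion loop is replaced by joining 5-character chunks with a space.
import Mathlib
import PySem

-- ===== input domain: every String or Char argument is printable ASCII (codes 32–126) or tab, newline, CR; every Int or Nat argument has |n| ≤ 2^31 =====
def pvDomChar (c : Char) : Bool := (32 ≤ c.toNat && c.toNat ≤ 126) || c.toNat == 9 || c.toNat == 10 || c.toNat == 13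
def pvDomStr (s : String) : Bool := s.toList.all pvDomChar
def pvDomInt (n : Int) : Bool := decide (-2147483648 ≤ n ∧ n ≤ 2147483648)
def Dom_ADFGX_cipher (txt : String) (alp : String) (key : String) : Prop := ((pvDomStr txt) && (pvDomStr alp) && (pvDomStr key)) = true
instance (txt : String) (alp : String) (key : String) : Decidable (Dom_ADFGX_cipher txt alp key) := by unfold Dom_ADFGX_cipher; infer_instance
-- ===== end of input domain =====

-- B replaces A's dict-bucket transposition by a stable sort of the distinct key letters with
-- per-letter column filters, and the manual space-insertion loop by joining 5-character chunks
-- (idiomatic; same asymptotic cost).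


-- ===== PORT A =====
def ADFGX_cipher (txt : String) (alp : String) (key : String) : String :=
  let row : List Char := ['A', 'D', 'F', 'G', 'X']
  -- 'if len(alp) != 25: raise ValueError' — excluded by Pre_; the port returns "" there
  if PySem.Str.len alp ≠ 25 then "" else
  let alpL : List Char := alp.toList
  let txtL : List Char := PySem.Chars.lower txt.toList
  let encrypted2 : List Char := txtL.foldl (fun acc s0 =>
    let s : Char := if s0 = 'j' then 'i' else s0
    if PySem.Chars.isIn [s] alpL then
      let alphabet_idx : Int := PySem.Chars.find alpL [s]
      let row_idx : Int := PySem.Int.floordiv alphabet_idx 5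
      let column_idx : Int := PySem.Int.mod alphabet_idx 5
      -- row[row_idx] / column[column_idx]: in range (find succeeded, len(alp) = 25), so pyGetD is exact
      acc ++ [PySem.List.pyGetD row row_idx ' ', PySem.List.pyGetD row column_idx ' ']
    else acc) []
  let key_dict0 : PySem.Dict Char (List Char) :=
    key.toList.foldl (fun d s => d.insert s []) PySem.Dict.empty
  let key_length : Int := PySem.Str.len key
  -- 'key_dict[key[idx % key_length]] += s': the looked-up key is always present (the dict holds every
  -- letter of key), so Python's get-then-set is Dict.modify; key_length = 0 with nonempty encrypted2
  -- is Python's ZeroDivisionError, excluded by Pre_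
  let key_dict : PySem.Dict Char (List Char) :=
    (PySem.List.enumerate encrypted2 0).foldl (fun d p =>
      d.modify (PySem.List.pyGetD key.toList (PySem.Int.mod p.1 key_length) ' ') [] (fun v => v ++ [p.2])) key_dict0
  -- dict(sorted(key_dict.items())): Python compares the (key, value) tuples, but the keys are
  -- distinct dict keys, so this is exactly a sort by the first component
  let key_dict2 : PySem.Dict Char (List Char) := PySem.Dict.mk (PySem.List.sorted key_dict.items (fun p => p.1))
  let encrypted3 : List Char := key_dict2.keys.foldl (fun acc d => acc ++ key_dict2.getD d []) []
  let length : Int := encrypted3.length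
  let encrypted : List Char := (PySem.List.enumerate encrypted3 0).foldl (fun acc p =>
    (acc ++ [p.2]) ++ (if PySem.Int.mod (p.1 + 1) 5 = 0 ∧ p.1 + 1 ≠ length then [' '] else [])) []
  String.mk encrypted

-- ===== PORT B =====
def ADFGX_cipher_alt (txt : String) (alp : String) (key : String) : String :=
  -- 'raise ValueError' — excluded by Pre_; the port returns "" there
  if PySem.Str.len alp ≠ 25 then "" else
  let rc : List Char := ['A', 'D', 'F', 'G', 'X']
  let alpL : List Char := alp.toList
  let enc2 : List Char := (PySem.Chars.lower txt.toList).foldl (fun acc s0 =>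
    let s : Char := if s0 = 'j' then 'i' else s0
    let i : Int := PySem.Chars.find alpL [s]
    if 0 ≤ i then
      (acc ++ [PySem.List.pyGetD rc (PySem.Int.floordiv i 5) ' ']) ++ [PySem.List.pyGetD rc (PySem.Int.mod i 5) ' ']
    else acc) []
  let L : Int := PySem.Str.len key
  let letters : List Char := PySem.List.sorted (PySem.Set.ofList key.toList) (fun c => c)
  let enc3 : List Char := letters.flatMap (fun letter =>
    ((PySem.List.enumerate enc2 0).filter (fun p =>
      PySem.List.pyGetD key.toList (PySem.Int.mod p.1 L) ' ' == letter)).map (fun p => p.2))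
  String.mk (PySem.Chars.join [' ']
    ((PySem.List.pyRange 0 (enc3.length : Int) 5).map (fun i => PySem.List.slice enc3 (some i) (some (i + 5)))))

-- ===== PRECONDITION & SPEC =====
-- Pre_ excludes only inputs on which A raises: len(alp) != 25 (ValueError), and an empty key
-- together with at least one text character that maps into the alphabet (ZeroDivisionError).
def Pre_ADFGX_cipher (txt : String) (alp : String) (key : String) : Prop :=
  PySem.Str.len alp = 25 ∧
    (key ≠ "" ∨ txt.toList.all
      (fun c => !(alp.toList.contains (if PySem.Chars.lowerChar c = 'j' then 'i' else PySem.Chars.lowerChar c))) = true)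
instance (txt : String) (alp : String) (key : String) : Decidable (Pre_ADFGX_cipher txt alp key) := by
  unfold Pre_ADFGX_cipher; infer_instance

def pvWitness_ADFGX_cipher : String × String × String :=
  ("Hello World", "abcdefghiklmnopqrstuvwxyz", "key")

def Spec_ADFGX_cipher (txt : String) (alp : String) (key : String) (out : String) : Prop :=
  out = ADFGX_cipher_alt txt alp key
instance (txt : String) (alp : String) (key : String) (out : String) : Decidable (Spec_ADFGX_cipher txt alp key out) := by
  unfold Spec_ADFGX_cipher; infer_instance

-- ===== CLAIM (what is proved, stated in full; the proofs are below) =====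
def Claim_equal_ADFGX_cipher : Prop := ∀ (txt : String) (alp : String) (key : String),
  Dom_ADFGX_cipher txt alp key → Pre_ADFGX_cipher txt alp key →
    Spec_ADFGX_cipher txt alp key (ADFGX_cipher txt alp key)


-- ===== LEMMAS AND PROOFS =====

theorem flatMap_singleton_snd (L : List (Int × Char)) (g : Int × Char → List Char)
    (h : ∀ p ∈ L, g p = [p.2]) : L.flatMap g = L.map (fun p => p.2) := by
  induction L with
  | nil => rfl
  | cons x xs ih =>
      simp only [List.flatMap_cons, List.map_cons, h x (by simp), List.singleton_append]
      rw [ih (fun p hp => h p (by simp [hp]))]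

theorem slice_nonneg (l : List Char) (a b : Int) (ha : 0 ≤ a) (hb : 0 ≤ b) :
    PySem.List.slice l (some a) (some b) = (l.drop a.toNat).take (b.toNat - a.toNat) := by
  have h := PySem.List.slice_natCast l a.toNat b.toNat
  rwa [Int.toNat_of_nonneg ha, Int.toNat_of_nonneg hb] at h

theorem chunks_cons (l : List Char) (h : l ≠ []) :
    (PySem.List.pyRange 0 (l.length : Int) 5).map (fun i => PySem.List.slice l (some i) (some (i + 5)))
      = l.take 5 :: (PySem.List.pyRange 0 ((l.drop 5).length : Int) 5).map
          (fun i => PySem.List.slice (l.drop 5) (some i) (some (i + 5))) := by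
  have hlen : 0 < l.length := List.length_pos_of_ne_nil h
  rw [PySem.List.pyRange_of_pos _ _ (by norm_num), PySem.List.pyRange_of_pos _ _ (by norm_num)]
  have hm : (if (0:Int) < (l.length:Int) then (((l.length:Int) - 0 + 5 - 1) / 5).toNat else 0)
      = ((l.drop 5).length + 4) / 5 + 1 := by
    rw [if_pos (by exact_mod_cast hlen)]
    have h1 : ((l.length:Int) - 0 + 5 - 1) = ((l.length + 4 : Nat) : Int) := by push_cast; ring
    rw [h1, show ((5:Int)) = ((5:Nat):Int) from rfl, ← Int.natCast_div, Int.toNat_natCast]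
    simp only [List.length_drop]
    omega
  have hm' : (if (0:Int) < ((l.drop 5).length:Int) then ((((l.drop 5).length:Int) - 0 + 5 - 1) / 5).toNat else 0)
      = ((l.drop 5).length + 4) / 5 := by
    by_cases hd : 0 < (l.drop 5).length
    · rw [if_pos (by exact_mod_cast hd)]
      have h1 : (((l.drop 5).length:Int) - 0 + 5 - 1) = (((l.drop 5).length + 4 : Nat) : Int) := by push_cast; ring
      rw [h1, show ((5:Int)) = ((5:Nat):Int) from rfl, ← Int.natCast_div, Int.toNat_natCast]
    · rw [if_neg (by exact_mod_cast hd)]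
      omega
  rw [hm, hm', List.range_succ_eq_map]
  simp only [List.map_cons, List.map_map]
  congr 1
  · rw [slice_nonneg _ _ _ (by positivity) (by positivity)]
    norm_num
    rw [show Int.toNat 5 = 5 from rfl]
  · apply List.map_congr_left
    intro k _
    show PySem.List.slice l (some (0 + 5 * ((k+1:Nat):Int))) (some (0 + 5 * ((k+1:Nat):Int) + 5))
        = PySem.List.slice (l.drop 5) (some (0 + 5 * (k:Int))) (some (0 + 5 * (k:Int) + 5))
    rw [slice_nonneg _ _ _ (by positivity) (by positivity),
        slice_nonneg _ _ _ (by positivity) (by positivity), List.drop_drop]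
    congr 1
    · omega
    · congr 1
      omega

theorem spacing_eq (n : Nat) : ∀ (l : List Char), l.length = n → ∀ (s : Nat), 5 ∣ s →
    (PySem.List.enumerate l (s : Int)).flatMap
      (fun p => p.2 :: (if PySem.Int.mod (p.1 + 1) 5 = 0 ∧ p.1 + 1 ≠ ((s + l.length : Nat) : Int) then [' '] else []))
    = PySem.Chars.join [' ']
        ((PySem.List.pyRange 0 (l.length : Int) 5).map (fun i => PySem.List.slice l (some i) (some (i + 5)))) := by
  induction n using Nat.strong_induction_on with
  | _ n ih =>
    intro l hl s hs
    by_cases hnil : l = []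
    · subst hnil
      simp [PySem.List.enumerate, PySem.Chars.join_nil,
        show PySem.List.pyRange (0:Int) (0:Int) 5 = [] from by decide]
    by_cases h5 : l.length ≤ 5
    · -- short final chunk: no space is inserted
      have hdrop : l.drop 5 = [] := by
        apply List.eq_nil_of_length_eq_zero; simp; omega
      rw [chunks_cons l hnil, hdrop]
      simp only [List.length_nil, Nat.cast_zero,
        show PySem.List.pyRange (0:Int) (0:Int) 5 = [] from by decide, List.map_nil,
        PySem.Chars.join_singleton, List.take_of_length_le h5]
      rw [flatMap_singleton_snd _ _ ?_, PySem.List.map_snd_enumerate]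
      intro p hp
      rcases (PySem.List.mem_enumerate_iff l (s:Int) p).mp hp with ⟨k, hk, rfl⟩
      simp only [List.cons.injEq, true_and]
      rw [if_neg]
      rintro ⟨hmod, hne⟩
      rw [PySem.Int.mod_eq_emod_of_pos (by norm_num)] at hmod
      apply hne
      obtain ⟨t, rfl⟩ := hs
      have hk5 : k = 4 := by omega
      have hlen5 : l.length = 5 := by omega
      push_cast
      omega
    · -- a full chunk of 5 followed by a nonempty remainder
      obtain ⟨a, b, c, d, e, rest, rfl⟩ :
          ∃ a b c d e rest, l = a :: b :: c :: d :: e :: rest := by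
        rcases l with _|⟨a,_|⟨b,_|⟨c,_|⟨d,_|⟨e,rest⟩⟩⟩⟩⟩ <;>
          first
          | exact ⟨_, _, _, _, _, _, rfl⟩
          | exact absurd (by simp) h5
      have hrest : rest ≠ [] := by
        intro hr; rw [hr] at h5; simp at h5
      have hrl : rest.length < n := by simp at hl; omega
      have IH := ih rest.length hrl rest rfl (s + 5) (by omega)
      obtain ⟨t, rfl⟩ := hs
      simp only [PySem.List.enumerate_cons, List.flatMap_cons, List.length_cons,
        PySem.Int.mod_eq_emod_of_pos (show (0:Int) < 5 by norm_num)] at *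
      rw [if_neg (by rintro ⟨hm, -⟩; push_cast at hm; omega),
          if_neg (by rintro ⟨hm, -⟩; push_cast at hm; omega),
          if_neg (by rintro ⟨hm, -⟩; push_cast at hm; omega),
          if_neg (by rintro ⟨hm, -⟩; push_cast at hm; omega),
          if_pos ⟨by push_cast; omega, by push_cast; omega⟩]
      rw [show ((((((5*t:Nat):Int) + 1) + 1) + 1) + 1) + 1 = (((5*t+5 : Nat)):Int) from by push_cast; ring]
      rw [show (5*t + (rest.length + 1 + 1 + 1 + 1 + 1) : Nat) = (5*t+5) + rest.length from by omega]
      rw [IH]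
      rw [show ((rest.length + 1 + 1 + 1 + 1 + 1 : Nat) : Int) = ((a :: b :: c :: d :: e :: rest).length : Int) from by simp]
      rw [chunks_cons (a :: b :: c :: d :: e :: rest) (by simp)]
      rw [show (a :: b :: c :: d :: e :: rest).take 5 = [a,b,c,d,e] from rfl,
          show (a :: b :: c :: d :: e :: rest).drop 5 = rest from rfl]
      conv_rhs => rw [chunks_cons rest hrest, PySem.Chars.join_cons_cons, ← chunks_cons rest hrest]
      simp

theorem spacing_top (l : List Char) :
    (PySem.List.enumerate l 0).foldl
      (fun acc p => acc ++ [p.2] ++ (if PySem.Int.mod (p.1 + 1) 5 = 0 ∧ p.1 + 1 ≠ (l.length : Int) then [' '] else [])) []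
    = PySem.Chars.join [' ']
        ((PySem.List.pyRange 0 (l.length : Int) 5).map (fun i => PySem.List.slice l (some i) (some (i + 5)))) := by
  have h1 : (PySem.List.enumerate l 0).foldl
      (fun acc p => acc ++ [p.2] ++ (if PySem.Int.mod (p.1 + 1) 5 = 0 ∧ p.1 + 1 ≠ (l.length : Int) then [' '] else [])) []
    = (PySem.List.enumerate l 0).foldl
      (fun acc p => acc ++ (p.2 :: (if PySem.Int.mod (p.1 + 1) 5 = 0 ∧ p.1 + 1 ≠ (l.length : Int) then [' '] else []))) [] := by
    apply PySem.List.foldl_congr_mem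
    intro acc p _
    simp
  rw [h1, PySem.List.foldl_append_eq_flatMap, List.nil_append]
  have h2 := spacing_eq l.length l rfl 0 (by omega)
  simpa using h2

theorem getD_init_dict (l : List Char) (d : PySem.Dict Char (List Char))
    (h : ∀ c, d.getD c [] = []) (c : Char) :
    (l.foldl (fun d s => d.insert s ([] : List Char)) d).getD c [] = [] := by
  induction l generalizing d with
  | nil => exact h c
  | cons x xs ih =>
      refine ih _ (fun c' => ?_)
      rw [PySem.Dict.getD_insert]
      split <;> simp [h]

theorem set_update_subset (xs : List Char) (s : PySem.Set Char)
    (h : ∀ x ∈ xs, x ∈ s) : PySem.Set.update s xs = s := by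
  induction xs generalizing s with
  | nil => rfl
  | cons x xs ih =>
      have hm : x ∈ s := h x (by simp)
      have hx : PySem.Set.add s x = s := by simp [PySem.Set.add, hm]
      show PySem.Set.update (PySem.Set.add s x) xs = s
      rw [hx]
      exact ih s (fun y hy => h y (by simp [hy]))

theorem getD_mk_map (ks : List Char) (v : Char → List Char) (k : Char) (hmem : k ∈ ks) :
    (PySem.Dict.mk (ks.map (fun k => (k, v k)))).getD k [] = v k := by
  induction ks with
  | nil => cases hmem
  | cons x xs ih =>
      simp only [List.map_cons, PySem.Dict.getD, PySem.Dict.get?_mk_cons]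
      by_cases hx : x = k
      · simp [hx]
      · have hk : k ∈ xs := by cases hmem with
          | head => exact absurd rfl hx
          | tail _ h => exact h
        have := ih hk
        simp only [PySem.Dict.getD] at this ⊢
        simpa [show (x == k) = false by simp [hx]] using this

theorem transpose_eq (key : String) (e2 : List Char) (hk : key.toList ≠ []) :
    (PySem.Dict.mk (PySem.List.sorted
        ((PySem.List.enumerate e2 0).foldl
          (fun d p => d.modify (PySem.List.pyGetD key.toList (PySem.Int.mod p.1 (PySem.Str.len key)) ' ') [] (fun v => v ++ [p.2]))
          (key.toList.foldl (fun d s => d.insert s []) PySem.Dict.empty)).items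
        (fun p => p.1))).keys.foldl
      (fun acc d => acc ++ (PySem.Dict.mk (PySem.List.sorted
        ((PySem.List.enumerate e2 0).foldl
          (fun d p => d.modify (PySem.List.pyGetD key.toList (PySem.Int.mod p.1 (PySem.Str.len key)) ' ') [] (fun v => v ++ [p.2]))
          (key.toList.foldl (fun d s => d.insert s []) PySem.Dict.empty)).items
        (fun p => p.1))).getD d []) []
    = (PySem.List.sorted (PySem.Set.ofList key.toList) (fun c => c)).flatMap
        (fun letter => ((PySem.List.enumerate e2 0).filter
          (fun p => PySem.List.pyGetD key.toList (PySem.Int.mod p.1 (PySem.Str.len key)) ' ' == letter)).map (fun p => p.2)) := by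
  have hL : (0:Int) < PySem.Str.len key := by
    rw [PySem.Str.len_eq]; exact_mod_cast List.length_pos_of_ne_nil hk
  set kd := (PySem.List.enumerate e2 0).foldl
      (fun d p => d.modify (PySem.List.pyGetD key.toList (PySem.Int.mod p.1 (PySem.Str.len key)) ' ') [] (fun v => v ++ [p.2]))
      (key.toList.foldl (fun d s => d.insert s []) PySem.Dict.empty) with hkd
  have hkeys0 : (key.toList.foldl (fun d s => d.insert s ([]:List Char)) PySem.Dict.empty).keys
      = PySem.Set.ofList key.toList := by
    rw [PySem.Dict.keys_foldl_insert, PySem.Set.ofList_eq_foldl]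
    rfl
  have hkeys : kd.keys = PySem.Set.ofList key.toList := by
    rw [hkd, PySem.Dict.keys_foldl_modify_key, hkeys0]
    apply set_update_subset
    intro x hx
    rcases List.mem_map.mp hx with ⟨p, _, rfl⟩
    rw [PySem.Set.mem_ofList]
    rw [PySem.List.pyGetD_eq_getElem key.toList ' ' (PySem.Int.mod_nonneg _ hL)
      (by rw [← PySem.Str.len_eq]; exact PySem.Int.mod_lt _ hL)]
    exact List.getElem_mem _
  have hnd : kd.keys.Nodup := hkeys ▸ PySem.Set.nodup_ofList _
  have hbucket : ∀ c, kd.getD c []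
      = ((PySem.List.enumerate e2 0).filter
          (fun p => PySem.List.pyGetD key.toList (PySem.Int.mod p.1 (PySem.Str.len key)) ' ' == c)).map (fun p => p.2) := by
    intro c
    have hrw : kd = ((PySem.List.enumerate e2 0).map
        (fun p => (PySem.List.pyGetD key.toList (PySem.Int.mod p.1 (PySem.Str.len key)) ' ', p.2))).foldl
        (fun d q => d.modify q.1 [] (fun v => v ++ [q.2]))
        (key.toList.foldl (fun d s => d.insert s []) PySem.Dict.empty) := by
      rw [hkd, List.foldl_map]
    rw [hrw, PySem.Dict.getD_foldl_modify_append,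
      getD_init_dict key.toList PySem.Dict.empty (fun c => rfl) c]
    simp [List.filter_map, List.map_map, Function.comp_def]
  have hsorted : PySem.List.sorted kd.items (fun p => p.1)
      = (PySem.List.sorted (PySem.Set.ofList key.toList) (fun c => c)).map (fun k => (k, kd.getD k [])) := by
    apply PySem.List.sorted_eq_of_perm_of_pairwise_lt
    · rw [PySem.Dict.items_eq_map_keys kd hnd [], hkeys]
      exact (PySem.List.sorted_perm _ _ _).map _
    · have hp := PySem.List.sorted_ofList_pairwise_lt key.toList
      exact hp.map _ (fun a b h => h)
  rw [hsorted]
  simp only [PySem.Dict.keys_mk, List.map_map]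
  have hid : ((fun (p : Char × List Char) => p.1) ∘ (fun k => (k, kd.getD k []))) = id := by
    funext x; rfl
  rw [hid, List.map_id]
  rw [PySem.List.foldl_congr_mem _ _
      (fun acc d => acc ++ ((PySem.List.enumerate e2 0).filter
        (fun p => PySem.List.pyGetD key.toList (PySem.Int.mod p.1 (PySem.Str.len key)) ' ' == d)).map (fun p => p.2)) _
      ?_]
  · rw [PySem.List.foldl_append_eq_flatMap, List.nil_append]
  · intro acc x hx
    rw [getD_mk_map _ _ _ hx, hbucket]

theorem enc2_eq (alpL : List Char) (txtL : List Char) :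
    txtL.foldl (fun acc s0 =>
      if PySem.Chars.isIn [if s0 = 'j' then 'i' else s0] alpL = true then
        acc ++ [PySem.List.pyGetD ['A','D','F','G','X'] (PySem.Int.floordiv (PySem.Chars.find alpL [if s0 = 'j' then 'i' else s0]) 5) ' ',
                PySem.List.pyGetD ['A','D','F','G','X'] (PySem.Int.mod (PySem.Chars.find alpL [if s0 = 'j' then 'i' else s0]) 5) ' ']
      else acc) []
  = txtL.foldl (fun acc s0 =>
      if 0 ≤ PySem.Chars.find alpL [if s0 = 'j' then 'i' else s0] then
        (acc ++ [PySem.List.pyGetD ['A','D','F','G','X'] (PySem.Int.floordiv (PySem.Chars.find alpL [if s0 = 'j' then 'i' else s0]) 5) ' ']) ++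
         [PySem.List.pyGetD ['A','D','F','G','X'] (PySem.Int.mod (PySem.Chars.find alpL [if s0 = 'j' then 'i' else s0]) 5) ' ']
      else acc) [] := by
  apply PySem.List.foldl_congr_mem
  intro acc x _
  by_cases h : PySem.Chars.isIn [if x = 'j' then 'i' else x] alpL = true
  · have h0 : 0 ≤ PySem.Chars.find alpL [if x = 'j' then 'i' else x] :=
      (PySem.Chars.find_nonneg_iff _ _).mpr ((PySem.Chars.isIn_iff_infix _ _).mp h)
    simp [h, h0]
  · have h0 : ¬ 0 ≤ PySem.Chars.find alpL [if x = 'j' then 'i' else x] := fun hc =>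
      h ((PySem.Chars.isIn_iff_infix _ _).mpr ((PySem.Chars.find_nonneg_iff _ _).mp hc))
    simp [h, h0]

theorem foldl_skip (l : List Char) (f : List Char → Char → List Char) (acc : List Char)
    (h : ∀ acc x, x ∈ l → f acc x = acc) : l.foldl f acc = acc := by
  induction l generalizing acc with
  | nil => rfl
  | cons x xs ih =>
      rw [List.foldl_cons, h acc x (by simp)]
      exact ih acc (fun a y hy => h a y (by simp [hy]))

theorem singleton_infix_iff (a : Char) (l : List Char) : [a] <:+: l ↔ a ∈ l := by
  constructor
  · intro hi; exact (List.singleton_sublist).mp hi.sublist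
  · intro hm; obtain ⟨s, t, rfl⟩ := List.append_of_mem hm; exact ⟨s, t, by simp⟩

-- ===== VERDICT (by name: the statement is the Claim_ definition above) =====
theorem ADFGX_cipher_spec : Claim_equal_ADFGX_cipher := by
  intro txt alp key hdom hpre
  obtain ⟨h25, hkey⟩ := hpre
  unfold Spec_ADFGX_cipher ADFGX_cipher ADFGX_cipher_alt
  rw [if_neg (by simp only [ne_eq, not_not]; simpa using h25),
      if_neg (by simp only [ne_eq, not_not]; simpa using h25)]
  simp only []
  rcases eq_or_ne key "" with hk | hk
  · -- empty key: Pre_ guarantees no text character maps, so everything is empty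
    subst hk
    rcases hkey with h | hall
    · exact absurd rfl h
    · have he0 : (PySem.Chars.lower txt.toList).foldl (fun acc s0 =>
          if PySem.Chars.isIn [if s0 = 'j' then 'i' else s0] alp.toList = true then
            acc ++ [PySem.List.pyGetD ['A','D','F','G','X'] (PySem.Int.floordiv (PySem.Chars.find alp.toList [if s0 = 'j' then 'i' else s0]) 5) ' ',
                    PySem.List.pyGetD ['A','D','F','G','X'] (PySem.Int.mod (PySem.Chars.find alp.toList [if s0 = 'j' then 'i' else s0]) 5) ' ']
          else acc) [] = [] := by
        apply foldl_skip
        intro acc x hx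
        rcases List.mem_map.mp hx with ⟨c, hc, rfl⟩
        have hcont := List.all_eq_true.mp hall c hc
        rw [if_neg]
        intro hin
        have hmem : (if PySem.Chars.lowerChar c = 'j' then 'i' else PySem.Chars.lowerChar c) ∈ alp.toList :=
          (singleton_infix_iff _ _).mp ((PySem.Chars.isIn_iff_infix _ _).mp hin)
        simp_all
      rw [he0]
      have hlet : PySem.List.sorted (PySem.Set.ofList ("" : String).toList) (fun c => c) = [] := by decide
      rw [hlet]
      simp only [List.flatMap_nil]
      decide
  · -- nonempty key
    have hkl : key.toList ≠ [] := by
      simp only [ne_eq, String.toList_eq_nil_iff]; exact hk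
    rw [enc2_eq]
    rw [transpose_eq key _ hkl]
    rw [spacing_top]
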